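-- pv_equiv track=rewrite | github.com/igorvanloo/Project-Euler-Explained | Unfinished Problems/pe00934 - Unlucky Primes.py | count
-- ===== SOURCE A (Python) =====
-- def count(d, N):
--     if d == 2:
--         k = N//2
--         return k*k
--
--     total = 0
--     for i in range(1, d):
--         #numbers of the form n = dk + i
--         if i % 2 == 0:
--             #We only care about even k = 2j
--             #Number are of the form 2*d*j + i
--             k = N//(2*d)
--
--             #sum_{j = 0}^k (2*d*j + i) = 2*d*sum_{j = 1}^{k} j + i*sum_{j = 0}^k 1 = d*(k*k - k) + i*(k + 1)
--
--             total += d*k*(k + 1) + i*k + i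
--         else:
--             #We only care about odd k = 2j + 1
--             #Number are of the form 2*d*j + (d + i)
--             k = N//(2*d)
--
--             #sum_{j = 0}^k 2*d*j + (d + i) = d*(k*k - k) + (d + i)*(k + 1)
--
--             total += d*k*(k + 1) + (d + i)*k + d + i
--     return total
-- ===== SOURCE B (Python) =====
-- def count(d, N):
--     if d == 2:
--         k = N // 2
--         return k * k
--     if d < 2:
--         return 0
--     # closed form over i = 1..d-1: each term is d*k*(k+1) + c_i*(k+1),
--     # c_i = i for even i, d+i for odd i; sum c_i = d*(d-1)//2 + d*(d//2)
--     k = N // (2 * d)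
--     return (d - 1) * d * k * (k + 1) + (k + 1) * (d * (d - 1) // 2 + d * (d // 2))
-- ===== Notes on version B (the rewrite author's own statement) =====
-- stated objective: faster
-- what changed: Replaced A's O(d) loop over residues i=1..d-1 by an O(1) closed form: the per-residue arithmetic-series contributions are summed symbolically (sum of i plus d times the count of odd residues), so B computes one formula instead of iterating.
import Mathlib
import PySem

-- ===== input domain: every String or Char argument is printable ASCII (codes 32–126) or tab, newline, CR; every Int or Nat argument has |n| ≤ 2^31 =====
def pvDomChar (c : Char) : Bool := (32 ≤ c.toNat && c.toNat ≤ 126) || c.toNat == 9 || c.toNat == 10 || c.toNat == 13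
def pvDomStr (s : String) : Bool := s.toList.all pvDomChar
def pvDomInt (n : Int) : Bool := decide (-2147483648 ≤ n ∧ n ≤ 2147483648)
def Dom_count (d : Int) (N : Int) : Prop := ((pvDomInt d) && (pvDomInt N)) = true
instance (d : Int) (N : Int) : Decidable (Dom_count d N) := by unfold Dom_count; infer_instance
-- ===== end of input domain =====

-- B replaces A's O(d) loop over residues by an O(1) closed form (arithmetic-series sums).

-- ===== PORT A =====
def count (d : Int) (N : Int) : Int :=
  if d == 2 then
    let k := PySem.Int.floordiv N 2
    k * k
  else
    (PySem.List.pyRange 1 d 1).foldl (fun total i =>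
      if PySem.Int.mod i 2 == 0 then
        let k := PySem.Int.floordiv N (2 * d)
        total + (d * k * (k + 1) + i * k + i)
      else
        let k := PySem.Int.floordiv N (2 * d)
        total + (d * k * (k + 1) + (d + i) * k + d + i)) 0

-- ===== PORT B =====
def count_alt (d : Int) (N : Int) : Int :=
  if d == 2 then
    let k := PySem.Int.floordiv N 2
    k * k
  else if d < 2 then
    0
  else
    let k := PySem.Int.floordiv N (2 * d)
    (d - 1) * d * k * (k + 1) +
      (k + 1) * (PySem.Int.floordiv (d * (d - 1)) 2 + d * PySem.Int.floordiv d 2)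

-- ===== PRECONDITION & SPEC =====
def Spec_count (d : Int) (N : Int) (out : Int) : Prop := out = count_alt d N
instance (d : Int) (N : Int) (out : Int) : Decidable (Spec_count d N out) := by unfold Spec_count; infer_instance

-- ===== CLAIM (what is proved, stated in full; the proofs are below) =====
def Claim_equal_count : Prop := ∀ (d : Int) (N : Int), Dom_count d N → Spec_count d N (count d N)

-- ===== LEMMAS AND PROOFS =====

-- A's loop body, with k = N // (2d) fixed as in A
def pvStep (d k : Int) (total i : Int) : Int :=
  if PySem.Int.mod i 2 == 0 then
    total + (d * k * (k + 1) + i * k + i)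
  else
    total + (d * k * (k + 1) + (d + i) * k + d + i)

-- closed form of A's loop up to m (Nat induction)
lemma pvLoop_closed (d k : Int) : ∀ m : Nat, 1 ≤ m →
    (PySem.List.pyRange 1 (m : Int) 1).foldl (pvStep d k) 0 =
      ((m : Int) - 1) * (d * k * (k + 1)) +
        (k + 1) * ((m * (m - 1) / 2 : Nat) + d * ((m / 2 : Nat) : Int)) := by
  intro m
  induction m with
  | zero => intro h; omega
  | succ n ih =>
    intro _
    by_cases hn : 1 ≤ n
    · have hb : (1 : Int) ≤ (n : Int) := by exact_mod_cast hn
      have hiter : PySem.List.pyRange 1 ((n : Int) + 1) 1 =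
          PySem.List.pyRange 1 (n : Int) 1 ++ [(n : Int)] :=
        PySem.List.pyRange_one_succ_right hb
      have hcast : ((n + 1 : Nat) : Int) = (n : Int) + 1 := by push_cast; ring
      rw [hcast, hiter, List.foldl_append, ih hn]
      simp only [List.foldl]
      have hs : ((n + 1) * (n + 1 - 1) / 2 : Nat) = (n * (n - 1) / 2 : Nat) + n := by
        have hab : (n + 1) * (n + 1 - 1) = n * (n - 1) + 2 * n := by
          obtain ⟨p, rfl⟩ : ∃ p, n = p + 1 := ⟨n - 1, by omega⟩
          simp only [Nat.add_sub_cancel]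
          ring
        have hev : n * (n - 1) % 2 = 0 := by
          have h := Nat.even_mul_succ_self (n - 1)
          rw [Nat.sub_add_cancel hn] at h
          rw [Nat.mul_comm]
          exact Nat.even_iff.mp h
        omega
      unfold pvStep
      rcases Nat.even_or_odd n with he | ho
      · have h2 : n % 2 = 0 := Nat.even_iff.mp he
        have hmod : PySem.Int.mod (n : Int) 2 = ((n % 2 : Nat) : Int) := by
          exact_mod_cast PySem.Int.mod_natCast n 2
        have hh : ((n + 1) / 2 : Nat) = (n / 2 : Nat) := by omega
        rw [hmod, h2]
        simp only [Nat.cast_zero, beq_self_eq_true, if_true]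
        rw [hs, hh]
        push_cast
        ring
      · have h2 : n % 2 = 1 := Nat.odd_iff.mp ho
        have hmod : PySem.Int.mod (n : Int) 2 = ((n % 2 : Nat) : Int) := by
          exact_mod_cast PySem.Int.mod_natCast n 2
        have hh : ((n + 1) / 2 : Nat) = (n / 2 : Nat) + 1 := by omega
        have hne : ((((n : Nat) % 2 : Nat) : Int) == 0) = false := by
          rw [h2]; decide
        rw [hmod, hne]
        simp only [Bool.false_eq_true, if_false]
        rw [hs, hh]
        push_cast
        ring
    · have hn0 : n = 0 := by omega
      subst hn0
      simp

lemma pvEmpty (d : Int) (h : d ≤ 1) : PySem.List.pyRange 1 d 1 = [] := by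
  simp only [PySem.List.pyRange_one]
  have : (d - 1).toNat = 0 := by omega
  simp [this]

-- ===== VERDICT (by name: the statement is the Claim_ definition above) =====
theorem count_spec : Claim_equal_count := by
  intro d N _
  unfold Spec_count count count_alt
  by_cases h2 : d = 2
  · simp [h2]
  · have hbe : (d == 2) = false := by simp [h2]
    rw [hbe]
    simp only [Bool.false_eq_true, if_false]
    by_cases hlt : d < 2
    · rw [if_pos hlt, pvEmpty d (by omega)]
      simp [List.foldl]
    · rw [if_neg hlt]
      have hd3 : 3 ≤ d := by omega
      set m := d.toNat with hm
      have hdm : d = (m : Int) := by omega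
      have h1m : 1 ≤ m := by omega
      have hA : (PySem.List.pyRange 1 d 1).foldl
          (fun total i =>
            if PySem.Int.mod i 2 == 0 then
              total + (d * PySem.Int.floordiv N (2*d) * (PySem.Int.floordiv N (2*d) + 1) + i * PySem.Int.floordiv N (2*d) + i)
            else
              total + (d * PySem.Int.floordiv N (2*d) * (PySem.Int.floordiv N (2*d) + 1) + (d + i) * PySem.Int.floordiv N (2*d) + d + i)) 0
          = (PySem.List.pyRange 1 (m : Int) 1).foldl (pvStep d (PySem.Int.floordiv N (2*d))) 0 := by
        rw [← hdm]; rfl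
      rw [hA, pvLoop_closed d (PySem.Int.floordiv N (2*d)) m h1m]
      have e1 : PySem.Int.floordiv (d * (d - 1)) 2 = ((m * (m - 1) / 2 : Nat) : Int) := by
        have : d * (d - 1) = ((m * (m - 1) : Nat) : Int) := by
          rw [hdm]; push_cast [Nat.cast_sub h1m]; ring
        rw [this]
        exact_mod_cast PySem.Int.floordiv_natCast (m * (m - 1)) 2
      have e2 : PySem.Int.floordiv d 2 = ((m / 2 : Nat) : Int) := by
        rw [hdm]
        exact_mod_cast PySem.Int.floordiv_natCast m 2
      rw [e1, e2, hdm]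
      ring
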